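-- pv_equiv track=rewrite | github.com/adelekap/adventofcode2020 | day9/find_flaw.py | find_sum_in_window
-- ===== SOURCE A (Python) =====
-- def find_sum_in_window(target_sum: int, options: list) -> tuple:
--     if len(options) >= 2:
--         sum = options[0] + options[-1]
--
--         if sum == target_sum:
--             return options[0], options[-1]
--
--         if sum > target_sum:
--             return find_sum_in_window(target_sum, options[:-1])
--
--         return find_sum_in_window(target_sum, options[1:])
-- ===== SOURCE B (Python) =====
-- def find_sum_in_window(target_sum: int, options: list) -> tuple:
--     # Two integer pointers instead of recursive slicing: O(n) time, O(1) extra space.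
--     lo, hi = 0, len(options) - 1
--     while lo < hi:
--         s = options[lo] + options[hi]
--         if s == target_sum:
--             return options[lo], options[hi]
--         if s > target_sum:
--             hi -= 1
--         else:
--             lo += 1
--     return None
-- ===== Notes on version B (the rewrite author's own statement) =====
-- stated objective: faster
-- what changed: Replaced A's recursion that copies a slice of the list at every step with an iterative two-pointer loop over integer indices, so no sublists are ever allocated.
import Mathlib
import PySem

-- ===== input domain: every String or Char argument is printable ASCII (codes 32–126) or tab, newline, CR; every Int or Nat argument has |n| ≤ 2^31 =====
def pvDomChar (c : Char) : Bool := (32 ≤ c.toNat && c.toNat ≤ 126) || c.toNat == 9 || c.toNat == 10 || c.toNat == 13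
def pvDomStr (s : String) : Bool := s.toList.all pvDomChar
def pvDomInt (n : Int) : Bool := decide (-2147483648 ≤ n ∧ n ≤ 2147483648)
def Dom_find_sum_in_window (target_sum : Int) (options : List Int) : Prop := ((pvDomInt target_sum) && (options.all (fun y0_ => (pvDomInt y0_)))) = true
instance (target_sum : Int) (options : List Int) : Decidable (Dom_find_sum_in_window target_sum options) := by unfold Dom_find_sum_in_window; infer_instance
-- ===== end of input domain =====

-- B replaces A's slice-copying recursion by an iterative two-pointer loop over indices (objective: faster, no per-step slice allocation).


-- ===== PORT A =====
-- Literal port of A: recursion peeling either the last element (options[:-1]) or the first (options[1:]).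
def find_sum_in_window (target_sum : Int) (options : List Int) : Option (List Int) :=
  if _h : options.length ≥ 2 then
    let s := PySem.List.pyGetD options 0 0 + PySem.List.pyGetD options (-1) 0
    if s = target_sum then
      some [PySem.List.pyGetD options 0 0, PySem.List.pyGetD options (-1) 0]
    else if s > target_sum then
      find_sum_in_window target_sum (PySem.List.slice options none (some (-1)))
    else
      find_sum_in_window target_sum (PySem.List.slice options (some 1) none)
  else none
termination_by options.length
decreasing_by
  · simp [PySem.List.slice_to_neg_one]
    omega
  · simp [PySem.List.slice_from_one]
    omega

-- ===== PORT B =====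
-- Port of B's while loop: two integer pointers, no slicing.
def fswLoop (target_sum : Int) (options : List Int) (lo hi : Int) : Option (List Int) :=
  if lo < hi then
    let a := PySem.List.pyGetD options lo 0
    let b := PySem.List.pyGetD options hi 0
    if a + b = target_sum then some [a, b]
    else if a + b > target_sum then fswLoop target_sum options lo (hi - 1)
    else fswLoop target_sum options (lo + 1) hi
  else none
termination_by (hi - lo).toNat
decreasing_by all_goals omega

def find_sum_in_window_alt (target_sum : Int) (options : List Int) : Option (List Int) :=
  fswLoop target_sum options 0 ((options.length : Int) - 1)

-- ===== PRECONDITION & SPEC =====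
def Spec_find_sum_in_window (target_sum : Int) (options : List Int) (out : Option (List Int)) : Prop := out = find_sum_in_window_alt target_sum options
instance (target_sum : Int) (options : List Int) (out : Option (List Int)) : Decidable (Spec_find_sum_in_window target_sum options out) := by unfold Spec_find_sum_in_window; infer_instance

-- ===== CLAIM (what is proved, stated in full; the proofs are below) =====
def Claim_equal_find_sum_in_window : Prop := ∀ (target_sum : Int) (options : List Int), Dom_find_sum_in_window target_sum options → Spec_find_sum_in_window target_sum options (find_sum_in_window target_sum options)

-- ===== LEMMAS AND PROOFS =====

-- A on the window options[lo..hi] equals B's loop at pointers (lo, hi).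
theorem fsw_window (t : Int) (L : List Int) :
    ∀ (n lo hi : Nat), hi < L.length → hi - lo = n →
      find_sum_in_window t ((L.drop lo).take (hi + 1 - lo)) =
        fswLoop t L (lo : Int) (hi : Int) := by
  intro n
  induction n with
  | zero =>
    intro lo hi hlen hn
    rw [find_sum_in_window, fswLoop]
    have h1 : ((L.drop lo).take (hi + 1 - lo)).length ≤ 1 := by
      simp [List.length_take]
      omega
    rw [dif_neg (by omega), if_neg (by exact_mod_cast (by omega : ¬ (lo:Int) < (hi:Int)))]
  | succ m ih =>
    intro lo hi hlen hn
    by_cases hlh : lo < hi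
    · have hwl : ((L.drop lo).take (hi + 1 - lo)).length = hi + 1 - lo := by
        simp [List.length_take]
        omega
      have hwne : (L.drop lo).take (hi + 1 - lo) ≠ [] := by
        intro h; rw [h] at hwl; simp at hwl; omega
      have hfirst : PySem.List.pyGetD ((L.drop lo).take (hi + 1 - lo)) 0 0 = L[lo] := by
        rw [PySem.List.pyGetD_zero, List.getD_eq_getElem _ _ (by omega)]
        rw [List.getElem_take, List.getElem_drop]
        simp
      have hlast : PySem.List.pyGetD ((L.drop lo).take (hi + 1 - lo)) (-1) 0 = L[hi] := by
        rw [PySem.List.pyGetD_neg_one _ _ hwne, List.getLast_eq_getElem]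
        simp only [hwl]
        rw [List.getElem_take, List.getElem_drop]
        congr 1
        omega
      have hA : PySem.List.pyGetD L (lo : Int) 0 = L[lo] := by
        rw [PySem.List.pyGetD_natCast, List.getD_eq_getElem _ _ (by omega)]
      have hB : PySem.List.pyGetD L (hi : Int) 0 = L[hi] := by
        rw [PySem.List.pyGetD_natCast, List.getD_eq_getElem _ _ hlen]
      have hlhi : (lo : Int) < (hi : Int) := by exact_mod_cast hlh
      rw [find_sum_in_window, fswLoop, dif_pos (by omega), if_pos hlhi]
      simp only [hfirst, hlast, hA, hB]
      by_cases heq : L[lo] + L[hi] = t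
      · simp [heq]
      · rw [if_neg heq, if_neg heq]
        by_cases hgt : L[lo] + L[hi] > t
        · rw [if_pos hgt, if_pos hgt]
          have hdrop : PySem.List.slice ((L.drop lo).take (hi + 1 - lo)) none (some (-1)) =
              (L.drop lo).take ((hi - 1) + 1 - lo) := by
            rw [PySem.List.slice_to_neg_one, List.dropLast_eq_take, hwl, List.take_take]
            congr 1
            omega
          rw [hdrop]
          have hc : ((hi:Int)) - 1 = ((hi - 1 : Nat) : Int) := by omega
          rw [hc]
          exact ih lo (hi - 1) (by omega) (by omega)
        · rw [if_neg hgt, if_neg hgt]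
          have htail : PySem.List.slice ((L.drop lo).take (hi + 1 - lo)) (some 1) none =
              (L.drop (lo + 1)).take (hi + 1 - (lo + 1)) := by
            rw [PySem.List.slice_from_one, ← List.drop_one, List.drop_take, List.drop_drop]
            congr 1
          rw [htail]
          have hc : ((lo:Int)) + 1 = ((lo + 1 : Nat) : Int) := by omega
          rw [hc]
          exact ih (lo + 1) hi (by omega) (by omega)
    · rw [find_sum_in_window, fswLoop]
      have h1 : ((L.drop lo).take (hi + 1 - lo)).length ≤ 1 := by
        simp [List.length_take]
        omega
      rw [dif_neg (by omega), if_neg (by exact_mod_cast (by omega : ¬ (lo:Int) < (hi:Int)))]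

-- ===== VERDICT (by name: the statement is the Claim_ definition above) =====
theorem find_sum_in_window_spec : Claim_equal_find_sum_in_window := by
  intro t L _
  unfold Spec_find_sum_in_window find_sum_in_window_alt
  rcases Nat.lt_or_ge L.length 2 with h2 | h2
  · rw [find_sum_in_window, fswLoop]
    rw [dif_neg (by omega), if_neg (by omega)]
  · have := fsw_window t L (L.length - 1) 0 (L.length - 1) (by omega) (by omega)
    simp at this
    have hcast : ((L.length : Int) - 1) = (((L.length - 1 : Nat)) : Int) := by omega
    rw [hcast]
    rw [← this]
    congr 1
    exact ((List.take_of_length_le (by omega)).symm)
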